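-- pv_equiv track=rewrite | github.com/paulmachholz/python_kurs_ws24 | functions.py | skew_compute
-- ===== SOURCE A (Python) =====
-- def skew_compute(genome: str) -> list[int]:
--     """Computes skew array for given genome
--
--     genome : str -> DNA sequence
--
--     Returns -> List of skew values at each position
--     """
--     skew = [0]
--     for base in genome:
--         if base == "G":
--             skew.append(skew[-1] + 1)
--         elif base == "C":
--             skew.append(skew[-1] - 1)
--         else:
--             skew.append(skew[-1])
--     return skew
-- ===== SOURCE B (Python) =====
-- def skew_compute(genome: str) -> list[int]:
--     """Computes skew array for given genome.
--
--     Builds the prefix array BACK-TO-FRONT: first get the final skew value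
--     from two substring counts, then walk the genome in reverse, undoing each
--     base's contribution, and reverse the collected values at the end.
--     """
--     total = genome.count("G") - genome.count("C")
--     out = [total]
--     for base in reversed(genome):
--         if base == "G":
--             total -= 1
--         elif base == "C":
--             total += 1
--         out.append(total)
--     out.reverse()
--     return out
-- ===== Notes on version B (the rewrite author's own statement) =====
-- stated objective: alternative
-- what changed: Instead of accumulating skew[-1] forward, B computes the final skew value from two str.count calls and then reconstructs the prefix array back-to-front by walking the genome in reverse and undoing each base's contribution, reversing the collected list at the end.
import Mathlib
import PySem

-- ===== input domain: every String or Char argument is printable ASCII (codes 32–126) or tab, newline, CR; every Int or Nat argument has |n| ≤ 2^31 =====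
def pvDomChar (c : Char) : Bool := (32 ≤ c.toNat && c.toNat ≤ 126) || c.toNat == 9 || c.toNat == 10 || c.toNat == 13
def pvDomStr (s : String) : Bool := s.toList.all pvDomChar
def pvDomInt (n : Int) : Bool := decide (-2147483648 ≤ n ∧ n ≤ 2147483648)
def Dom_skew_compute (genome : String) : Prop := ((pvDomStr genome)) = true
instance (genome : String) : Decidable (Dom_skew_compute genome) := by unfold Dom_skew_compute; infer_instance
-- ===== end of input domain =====

-- B rebuilds the skew prefix array back-to-front: the last value comes from two
-- substring counts, then a reverse walk undoes each base's contribution; objective = alternative.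

-- ===== PORT A =====
-- one loop step: append skew[-1] (+1 for 'G', -1 for 'C', +0 otherwise); skew is never
-- empty so getLast? is always some (the `none` branch is unreachable).
def skewStepA (skew : List Int) (base : Char) : List Int :=
  match skew.getLast? with
  | some l => if base = 'G' then skew ++ [l + 1]
              else if base = 'C' then skew ++ [l - 1]
              else skew ++ [l]
  | none => skew

def skew_compute (genome : String) : List Int :=
  genome.toList.foldl skewStepA [0]

-- ===== PORT B =====
-- one loop step of B: undo the contribution of `base` and append the new total
def skewStepB (p : Int × List Int) (base : Char) : Int × List Int :=
  let t := if base = 'G' then p.1 - 1 else if base = 'C' then p.1 + 1 else p.1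
  (t, p.2 ++ [t])

def skew_compute_alt (genome : String) : List Int :=
  let total : Int := (PySem.Str.count genome "G" : Int) - (PySem.Str.count genome "C" : Int)
  let r := genome.toList.reverse.foldl skewStepB (total, [total])
  r.2.reverse

-- ===== PRECONDITION & SPEC =====
def Spec_skew_compute (genome : String) (out : List Int) : Prop := out = skew_compute_alt genome
instance (genome : String) (out : List Int) : Decidable (Spec_skew_compute genome out) := by unfold Spec_skew_compute; infer_instance

-- ===== CLAIM =====
def Claim_equal_skew_compute : Prop := ∀ (genome : String), Dom_skew_compute genome → Spec_skew_compute genome (skew_compute genome)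

-- ===== LEMMAS AND PROOFS =====

-- the per-base skew delta (proof-only characterisation)
def skewDelta (base : Char) : Int :=
  if base = 'G' then 1 else if base = 'C' then -1 else 0

theorem skewStepA_eq (skew : List Int) (l : Int) (h : skew.getLast? = some l) (base : Char) :
    skewStepA skew base = skew ++ [l + skewDelta base] := by
  unfold skewStepA skewDelta
  rw [h]
  by_cases hG : base = 'G' <;> by_cases hC : base = 'C' <;> simp_all <;> ring_nf

theorem foldl_skewStepA (cs : List Char) (skew : List Int) (l : Int)
    (h : skew.getLast? = some l) :
    cs.foldl skewStepA skew = skew ++ ((cs.map skewDelta).scanl (· + ·) l).tail := by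
  induction cs generalizing skew l with
  | nil => simp
  | cons c cs ih =>
    simp only [List.foldl_cons, List.map_cons, List.scanl_cons]
    rw [skewStepA_eq skew l h c,
        ih (skew ++ [l + skewDelta c]) (l + skewDelta c) (by simp)]
    cases cs <;> simp [List.scanl_cons]

-- A computes the prefix-sum scan of the deltas
theorem skew_compute_eq (genome : String) :
    skew_compute genome = (genome.toList.map skewDelta).scanl (· + ·) 0 := by
  unfold skew_compute
  rw [foldl_skewStepA genome.toList [0] 0 (by simp)]
  cases h : genome.toList.map skewDelta <;> simp [List.scanl_cons]

theorem skewStepB_eq (p : Int × List Int) (base : Char) :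
    skewStepB p base = (p.1 - skewDelta base, p.2 ++ [p.1 - skewDelta base]) := by
  unfold skewStepB skewDelta
  by_cases hG : base = 'G' <;> by_cases hC : base = 'C' <;> simp_all <;> ring_nf

-- B's loop produces the backward subtraction scan
theorem foldl_skewStepB (cs : List Char) (t : Int) (out : List Int) :
    cs.foldl skewStepB (t, out)
      = (cs.foldl (fun a b => a - skewDelta b) t,
         out ++ ((cs.map skewDelta).scanl (· - ·) t).tail) := by
  induction cs generalizing t out with
  | nil => simp
  | cons c cs ih =>
    simp only [List.foldl_cons, List.map_cons, List.scanl_cons]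
    rw [skewStepB_eq, ih]
    cases cs <;> simp [List.scanl_cons]

-- reversing the backward subtraction scan started at the total sum gives the forward scan
theorem scanl_sub_reverse (d : List Int) (t : Int) :
    ((d.reverse.scanl (· - ·) t)).reverse = d.scanl (· + ·) (t - d.sum) := by
  induction d using List.reverseRecOn generalizing t with
  | nil => simp
  | append_singleton d x ih =>
    rw [show (d ++ [x]).reverse = x :: d.reverse by simp]
    simp only [List.scanl_cons, List.reverse_cons]
    rw [ih (t - x)]
    have hs : ∀ (a : Int) (l : List Int) (y : Int),
        (l ++ [y]).scanl (· + ·) a = l.scanl (· + ·) a ++ [l.foldl (· + ·) a + y] := by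
      intro a l
      induction l generalizing a with
      | nil => simp
      | cons h tl ih2 => intro y; simp [List.scanl_cons, ih2]
    rw [hs]
    have hfold : ∀ (l : List Int) (a : Int), l.foldl (· + ·) a = a + l.sum := by
      intro l
      induction l with
      | nil => simp
      | cons h tl ih3 => intro a; simp [List.foldl_cons, ih3]; ring
    simp [List.sum_append, hfold]
    constructor
    · congr 1; ring
    · ring

-- sum of deltas = count 'G' - count 'C'
theorem sum_map_skewDelta (cs : List Char) :
    (cs.map skewDelta).sum = (cs.count 'G' : Int) - (cs.count 'C' : Int) := by
  induction cs with
  | nil => simp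
  | cons c cs ih =>
    simp only [List.map_cons, List.sum_cons, ih, List.count_cons]
    unfold skewDelta
    by_cases hG : c = 'G' <;> by_cases hC : c = 'C' <;> simp_all <;> push_cast <;> ring

-- Chars.count.go with a single-character needle counts occurrences of that character
theorem count_go_single (c : Char) : ∀ (fuel : Nat) (l : List Char) (acc : Nat), l.length ≤ fuel →
    PySem.Chars.count.go [c] fuel l acc = acc + l.count c := by
  intro fuel
  induction fuel with
  | zero =>
    intro l acc h
    rw [List.length_eq_zero_iff.mp (Nat.le_zero.mp h)]
    simp [PySem.Chars.count.go]
  | succ n ih =>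
    intro l acc h
    match l with
    | [] => simp [PySem.Chars.count.go]
    | h' :: t =>
      rw [PySem.Chars.count.go]
      by_cases hc : h' = c
      · simp_all [List.isPrefixOf, ih t (acc + 1) (by simpa using h)]
        omega
      · simp_all [List.isPrefixOf, ih t acc (by simpa using h), Ne.symm hc]

-- str.count of a single-character needle counts that character
theorem chars_count_single (cs : List Char) (c : Char) :
    PySem.Chars.count cs [c] = cs.count c := by
  simp [PySem.Chars.count, count_go_single c cs.length cs 0 le_rfl]

-- every non-empty scanl starts with its seed
theorem scanl_head (f : Int → Int → Int) (t : Int) (l : List Int) :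
    l.scanl f t = t :: (l.scanl f t).tail := by
  cases l <;> simp [List.scanl_cons]

-- ===== VERDICT =====
theorem skew_compute_spec : Claim_equal_skew_compute := by
  intro genome _
  unfold Spec_skew_compute
  rw [skew_compute_eq]
  unfold skew_compute_alt
  simp only []
  rw [foldl_skewStepB]
  have hG : (PySem.Str.count genome "G" : Nat) = genome.toList.count 'G' := by
    have : ("G" : String).toList = ['G'] := by decide
    simp [PySem.Str.count_eq, this, chars_count_single]
  have hC : (PySem.Str.count genome "C" : Nat) = genome.toList.count 'C' := by
    have : ("C" : String).toList = ['C'] := by decide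
    simp [PySem.Str.count_eq, this, chars_count_single]
  simp only [hG, hC]
  set T : Int := (genome.toList.count 'G' : Int) - (genome.toList.count 'C' : Int) with hT
  have hsum : (genome.toList.map skewDelta).sum = T := (sum_map_skewDelta genome.toList).symm ▸ rfl
  have h1 : [T] ++ ((genome.toList.reverse.map skewDelta).scanl (· - ·) T).tail
      = (genome.toList.map skewDelta).reverse.scanl (· - ·) T := by
    rw [← List.map_reverse]
    rw [scanl_head (· - ·) T (genome.toList.reverse.map skewDelta)]
    simp
  rw [h1, scanl_sub_reverse]
  rw [show T - (genome.toList.map skewDelta).sum = 0 by rw [sum_map_skewDelta]; ring]
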